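-- pv_equiv track=rewrite | github.com/nomadis08/CodeWarsSolution | diam.py | diamond
-- ===== SOURCE A (Python) =====
-- def diamond(n):
--     mid=n%2
--     if not mid:
--         return None
--     result='*'*n+'\n'
--     for i in range(1,n//2+1):
--         tmp=' '*i+'*'*(n-i*2)+'\n'
--         result=tmp+result+tmp
--     return result
-- ===== SOURCE B (Python) =====
-- def diamond(n):
--     if n % 2 == 0:
--         return None
--     half = n // 2
--     dists = list(range(half, 0, -1)) + [0] + list(range(1, half + 1))
--     chars = []
--     for d in dists:
--         for c in range(n - d):
--             chars.append(' ' if c < d else '*')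
--         chars.append('\n')
--     return ''.join(chars)
-- ===== Notes on version B (the rewrite author's own statement) =====
-- stated objective: alternative
-- what changed: B generates the diamond character by character from the coordinate predicate (column < indent ? space : star) over an explicit top-to-bottom list of row indents, instead of A's per-row string-repetition rows accreted by prepending and appending around the middle row.
import Mathlib
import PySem

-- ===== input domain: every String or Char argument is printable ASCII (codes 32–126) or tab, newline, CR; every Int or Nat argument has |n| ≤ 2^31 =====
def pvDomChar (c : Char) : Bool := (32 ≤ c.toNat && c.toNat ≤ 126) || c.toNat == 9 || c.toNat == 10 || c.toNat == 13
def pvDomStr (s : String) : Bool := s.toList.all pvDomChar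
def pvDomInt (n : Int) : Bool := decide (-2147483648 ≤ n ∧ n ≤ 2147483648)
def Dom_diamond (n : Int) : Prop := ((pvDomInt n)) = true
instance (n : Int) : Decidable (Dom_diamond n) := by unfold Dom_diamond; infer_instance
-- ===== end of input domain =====

-- B generates the diamond character by character from a coordinate predicate (c < d ?)
-- over an explicit list of row indents, instead of A's per-row string repetition with
-- prepend-and-append accretion around the middle; same value on every input (alternative
-- decomposition, no speed claim).

-- ===== PORT A =====
def diamond (n : Int) : Option String :=
  let mid := PySem.Int.mod n 2
  if mid == 0 then none
  else
    let result : List Char := PySem.List.pyRepeat ['*'] n ++ ['\n']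
    let result := (PySem.List.pyRange 1 (PySem.Int.floordiv n 2 + 1) 1).foldl
      (fun r i =>
        let tmp := PySem.List.pyRepeat [' '] i ++ PySem.List.pyRepeat ['*'] (n - i * 2) ++ ['\n']
        tmp ++ r ++ tmp) result
    some (String.mk result)

-- ===== PORT B =====
def diamond_alt (n : Int) : Option String :=
  if PySem.Int.mod n 2 == 0 then none
  else
    let half := PySem.Int.floordiv n 2
    let dists := PySem.List.pyRange half 0 (-1) ++ [(0 : Int)] ++ PySem.List.pyRange 1 (half + 1) 1
    let chars := dists.foldl (fun cs d =>
      ((PySem.List.pyRange 0 (n - d) 1).foldl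
        (fun cs' c => cs' ++ [if c < d then ' ' else '*']) cs) ++ ['\n']) []
    some (String.mk chars)

-- ===== PRECONDITION & SPEC =====
def Spec_diamond (n : Int) (out : Option String) : Prop := out = diamond_alt n
instance (n : Int) (out : Option String) : Decidable (Spec_diamond n out) := by unfold Spec_diamond; infer_instance

-- ===== CLAIM (what is proved, stated in full; the proofs are below) =====
def Claim_equal_diamond : Prop := ∀ (n : Int), Dom_diamond n → Spec_diamond n (diamond n)

-- ===== LEMMAS AND PROOFS =====

-- a range mapped to a constant is a replicate
theorem map_pyRange_const (a b : Int) (f : Int → Char) (v : Char)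
    (h : ∀ x : Int, a ≤ x → x < b → f x = v) :
    (PySem.List.pyRange a b 1).map f = List.replicate (b - a).toNat v := by
  rw [List.eq_replicate_iff]
  constructor
  · simp [PySem.List.length_pyRange_one]
  · intro c hc
    obtain ⟨x, hx, rfl⟩ := List.mem_map.mp hc
    obtain ⟨h1, h2⟩ := PySem.List.mem_pyRange_one.mp hx
    exact h x h1 h2

-- B's row of characters (for indent d, 0 ≤ 2d ≤ n + something) equals A's row built by
-- string repetition: d spaces then n-2d stars
theorem row_chars_eq (n d : Int) (hd : 0 ≤ d) (hdn : d * 2 ≤ n ∨ (d = 0 ∧ n < 0)) :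
    (PySem.List.pyRange 0 (n - d) 1).map (fun c => if c < d then ' ' else '*')
      = PySem.List.pyRepeat [' '] d ++ PySem.List.pyRepeat ['*'] (n - d * 2) := by
  rcases hdn with hdn | ⟨rfl, hneg⟩
  · have hsplit := PySem.List.pyRange_one_append 0 d (n - d) hd (by omega)
    rw [hsplit, List.map_append]
    rw [map_pyRange_const 0 d _ ' ' (fun x _ h2 => by simp [h2]),
        map_pyRange_const d (n - d) _ '*' (fun x h1 _ => by simp [not_lt.mpr h1]),
        PySem.List.pyRepeat_singleton, PySem.List.pyRepeat_singleton]
    congr 2 <;> omega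
  · rw [PySem.List.pyRange_one_eq_nil (by omega)]
    simp only [PySem.List.pyRepeat_singleton]
    have h0 : (n - 0 * 2).toNat = 0 := by omega
    have h1 : ((0 : Int)).toNat = 0 := rfl
    simp [h1]
    omega

-- A's accretion loop over range(1, 1+k) equals reversed-rows ++ middle ++ rows
theorem accrete_eq_join (f : Int → List Char) (mid : List Char) (k : Nat) :
    (PySem.List.pyRange 1 (1 + (k : Int)) 1).foldl (fun r i => f i ++ r ++ f i) mid
      = ((PySem.List.pyRange 1 (1 + (k : Int)) 1).map f).reverse.flatten ++ mid
          ++ ((PySem.List.pyRange 1 (1 + (k : Int)) 1).map f).flatten := by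
  induction k with
  | zero => simp [PySem.List.pyRange_one_eq_nil]
  | succ m ih =>
    have h1 : (1 : Int) ≤ 1 + (m : Int) := by omega
    have : (1 : Int) + ((m + 1 : Nat) : Int) = (1 + (m : Int)) + 1 := by push_cast; ring
    rw [this, PySem.List.pyRange_one_succ_right h1]
    simp only [List.foldl_append, List.foldl_cons, List.foldl_nil, List.map_append,
      List.reverse_append, List.flatten_append, List.map_cons, List.map_nil, ih]
    simp

-- B's double fold is the flattening of the per-row character lists
theorem b_fold_eq_flatten (n : Int) (l : List Int) (acc : List Char) :
    l.foldl (fun cs d =>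
      ((PySem.List.pyRange 0 (n - d) 1).foldl
        (fun cs' c => cs' ++ [if c < d then ' ' else '*']) cs) ++ ['\n']) acc
      = acc ++ (l.map (fun d =>
          (PySem.List.pyRange 0 (n - d) 1).map (fun c => if c < d then ' ' else '*')
            ++ ['\n'])).flatten := by
  induction l generalizing acc with
  | nil => simp
  | cons d t ih =>
    simp only [List.foldl_cons]
    rw [PySem.List.foldl_append_singleton_eq_map, ih]
    simp

theorem diamond_eq (n : Int) : diamond n = diamond_alt n := by
  unfold diamond diamond_alt
  by_cases h : PySem.Int.mod n 2 == 0
  · simp only [h, ite_true]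
  · simp only [h, Bool.false_eq_true, ite_false]
    have hmod : n % 2 ≠ 0 := by
      simpa [PySem.Int.mod_eq_emod_of_pos (show (0:Int) < 2 by omega)] using h
    set half := PySem.Int.floordiv n 2 with hhalf
    have hfd : half = n / 2 := PySem.Int.floordiv_eq_ediv_of_pos (by omega)
    rw [b_fold_eq_flatten]
    have hRrev : PySem.List.pyRange half 0 (-1) = (PySem.List.pyRange 1 (half + 1) 1).reverse := by
      have := PySem.List.pyRange_neg_one_eq_reverse half 0
      simpa using this
    rw [hRrev]
    simp only [List.map_append, List.map_cons, List.map_nil, List.flatten_append,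
      List.flatten_cons, List.flatten_nil, List.nil_append, List.append_nil]
    have hcong : ∀ l : List Int, (∀ i ∈ l, 1 ≤ i ∧ i < half + 1) →
        l.map (fun d => (PySem.List.pyRange 0 (n - d) 1).map
            (fun c => if c < d then ' ' else '*') ++ ['\n'])
          = l.map (fun i => PySem.List.pyRepeat [' '] i
              ++ PySem.List.pyRepeat ['*'] (n - i * 2) ++ ['\n']) := by
      intro l hl
      apply List.map_congr_left
      intro i hi
      obtain ⟨h1, h2⟩ := hl i hi
      rw [row_chars_eq n i (by omega) (Or.inl (by omega))]
    rw [hcong _ (fun i hi => PySem.List.mem_pyRange_one.mp hi),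
        hcong _ (fun i hi => PySem.List.mem_pyRange_one.mp (List.mem_reverse.mp hi))]
    have hd0 : (0 : Int) * 2 ≤ n ∨ ((0 : Int) = 0 ∧ n < 0) := by
      by_cases hn : 0 ≤ n
      · exact Or.inl (by omega)
      · exact Or.inr ⟨rfl, by omega⟩
    have hmid : (PySem.List.pyRange 0 (n - 0) 1).map (fun c => if c < (0 : Int) then ' ' else '*')
        = List.replicate n.toNat '*' := by
      rw [row_chars_eq n 0 le_rfl hd0]
      simp only [PySem.List.pyRepeat_singleton]
      simp
    rw [hmid]
    simp only [PySem.List.pyRepeat_singleton]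
    by_cases hh : half + 1 ≤ 1
    · rw [PySem.List.pyRange_one_eq_nil hh]
      simp
    · obtain ⟨k, hk⟩ : ∃ k : Nat, half + 1 = 1 + (k : Int) := ⟨half.toNat, by omega⟩
      rw [hk, accrete_eq_join]
      simp [List.map_reverse]

-- ===== VERDICT (by name: the statement is the Claim_ definition above) =====
theorem diamond_spec : Claim_equal_diamond := by
  intro n _
  unfold Spec_diamond
  exact diamond_eq n
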